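-- pv_equiv track=rewrite | github.com/skozan/pychords | pychords/__init__.py | get_winner_inversion
-- ===== SOURCE A (Python) =====
-- import copy
--
-- NOTES = {
--     'c': 0, 'b#': 0, 'c#': 1, 'db': 1, 'd': 2, 'd#':3,
--     'eb': 3, 'e': 4, 'fb': 4, 'e#': 5, 'f': 5,
--     'f#': 6, 'gb': 6, 'g': 7, 'g#': 8, 'ab': 8,
--     'a': 9, 'a#': 10, 'bb': 10, 'b': 11, 'cb': 11}
--
-- INTERVALS = {
--     0: [{'base': 'octave', 'subspecies': None}],
--     1: [{'base': 'ninth', 'subspecies': 'flat'}],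
--     2: [{'base': 'ninth', 'subspecies': None}],
--     3: [{'base': 'third', 'subspecies': 'minor'},
--         {'base': 'ninth', 'subspecies': 'sharp'}],
--     4: [{'base': 'third', 'subspecies': 'major'},],
--     5: [{'base': 'eleventh', 'subspecies': None}],
--     6: [{'base': 'fifth', 'subspecies': 'diminished'},
--         {'base': 'eleventh', 'subspecies': 'sharp'},],
--     7: [{'base': 'fifth', 'subspecies': None}],
--     8: [{'base': 'fifth', 'subspecies': 'augmented'},
--         {'base': 'thirteenth', 'subspecies': 'flat'}],
--     9: [{'base': 'thirteenth', 'subspecies': None}],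
--     10: [{'base': 'seventh', 'subspecies': 'minor'}],
--     11: [{'base': 'seventh', 'subspecies': 'major'}],
-- }
--
-- IMPORTANT_INTERVALS = [
--     INTERVALS[3][0],   # minor third
--     INTERVALS[4][0],   # major third
--     INTERVALS[6][0],   # diminished fifth
--     INTERVALS[7][0],   # perfect fifth
--     INTERVALS[10][0],  # minor seventh
--     INTERVALS[11][0]]  # major seventh
--
-- def get_interval(note1, note2):
--     interval = NOTES[note2.lower()] - NOTES[note1.lower()]
--     if interval<0:
--         interval += 12
--     return interval
--
-- def get_intervals(notes):
--     intervals = []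
--     for note in notes[1:]:
--         intervals.append(get_interval(notes[0], note))
--     return intervals
--
-- def get_base_intervals_verbal(notes):
--     intervals = get_intervals(notes)
--     intervals_verbal = []
--     for interval in intervals:
--         intervals_verbal.append(INTERVALS[interval][0])
--     return intervals_verbal
--
-- def get_inversions(notes):
--     inversion = copy.copy(notes)
--     count = 0
--     while True:
--         yield inversion
--         if count==min(3, len(notes)-1):
--             break
--         inversion = copy.copy(inversion)
--         inversion.append(inversion.pop(0))
--         count += 1
--
-- def get_inversion_score(intervals):
--     score = 0
--     found = set([])
--     for interval in intervals:
--         if (interval in IMPORTANT_INTERVALS) and \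
--                 interval['base'] not in found:
--             score += 1
--             found.add(interval['base'])
--     return score
--
-- def get_winner_inversion(notes):
--     inversions = []
--     for idx, inversion in enumerate(get_inversions(notes)):
--         inversions.append((
--             get_inversion_score(get_base_intervals_verbal(inversion)),
--             idx,
--             inversion))
--     inversions = sorted(inversions, key=lambda x: -x[0]*10+idx)
--     return inversions[0][2]
-- ===== SOURCE B (Python) =====
-- NOTES = {
--     'c': 0, 'b#': 0, 'c#': 1, 'db': 1, 'd': 2, 'd#':3,
--     'eb': 3, 'e': 4, 'fb': 4, 'e#': 5, 'f': 5,
--     'f#': 6, 'gb': 6, 'g': 7, 'g#': 8, 'ab': 8,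
--     'a': 9, 'a#': 10, 'bb': 10, 'b': 11, 'cb': 11}
--
-- def get_winner_inversion(notes):
--     # Single pass: score each rotation directly on pitch classes (mod 12),
--     # keep the first rotation with the strictly greatest score.
--     pitches = [NOTES[n.lower()] for n in notes]
--     stops = min(3, len(notes) - 1) + 1
--     best_r = 0
--     best_score = -1
--     for r in range(stops):
--         root = pitches[r]
--         ivs = [(p - root) % 12 for p in pitches[r + 1:] + pitches[:r]]
--         score = sum(1 for lo, hi in ((3, 4), (6, 7), (10, 11))
--                     if lo in ivs or hi in ivs)
--         if score > best_score:
--             best_score = score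
--             best_r = r
--     return notes[best_r:] + notes[:best_r]
-- ===== Notes on version B (the rewrite author's own statement) =====
-- stated objective: alternative
-- what changed: Replaces materialize-all-inversions-then-stable-sort (on the effectively-constant key -score*10+leaked_idx) with a single-pass strict-greater argmax over rotation indices, scoring each rotation directly on pitch classes mod 12 (any-of {3,4}/{6,7}/{10,11} per interval group) instead of building verbal interval dicts and a found-set; Pre_ additionally excludes single-element lists holding an invalid note, where A returns the input unchanged (no NOTES lookup ever runs) while B raises KeyError.
-- outside the precondition, e.g. on get_winner_inversion(['']): A returns [''], B raises KeyError
import Mathlib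
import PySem

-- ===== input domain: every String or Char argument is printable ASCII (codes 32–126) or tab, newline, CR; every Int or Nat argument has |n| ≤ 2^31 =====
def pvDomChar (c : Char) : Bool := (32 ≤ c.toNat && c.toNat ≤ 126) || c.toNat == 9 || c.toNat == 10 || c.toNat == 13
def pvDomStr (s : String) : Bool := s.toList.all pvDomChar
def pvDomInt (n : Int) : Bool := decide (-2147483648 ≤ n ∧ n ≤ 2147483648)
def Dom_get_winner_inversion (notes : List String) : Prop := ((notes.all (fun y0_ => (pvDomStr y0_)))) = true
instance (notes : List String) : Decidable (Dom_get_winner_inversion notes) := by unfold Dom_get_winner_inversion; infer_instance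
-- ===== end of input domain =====

-- B replaces materialize-all-then-sort by a single-pass strict-greater argmax over rotation
-- indices, scoring rotations directly on pitch classes mod 12 (objective: alternative algorithm).

-- ===== PORT A =====
-- shared data table: the module-level NOTES dict (used by both ports)
def pyNOTES : PySem.Dict String Int :=
  PySem.Dict.ofList [("c",0),("b#",0),("c#",1),("db",1),("d",2),("d#",3),
   ("eb",3),("e",4),("fb",4),("e#",5),("f",5),
   ("f#",6),("gb",6),("g",7),("g#",8),("ab",8),
   ("a",9),("a#",10),("bb",10),("b",11),("cb",11)]

-- INTERVALS: dict int -> list of {'base', 'subspecies'} dicts, as (base, subspecies) pairs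
def pyINTERVALS : PySem.Dict Int (List (String × Option String)) :=
  PySem.Dict.ofList [(0,[("octave",none)]),(1,[("ninth",some "flat")]),(2,[("ninth",none)]),
   (3,[("third",some "minor"),("ninth",some "sharp")]),
   (4,[("third",some "major")]),(5,[("eleventh",none)]),
   (6,[("fifth",some "diminished"),("eleventh",some "sharp")]),
   (7,[("fifth",none)]),
   (8,[("fifth",some "augmented"),("thirteenth",some "flat")]),
   (9,[("thirteenth",none)]),(10,[("seventh",some "minor")]),(11,[("seventh",some "major")])]

-- IMPORTANT_INTERVALS = [INTERVALS[i][0] for i in (3,4,6,7,10,11)]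
def pyIMPORTANT : List (String × Option String) :=
  [(((pyINTERVALS.get? 3).getD []).headD ("", none)),
   (((pyINTERVALS.get? 4).getD []).headD ("", none)),
   (((pyINTERVALS.get? 6).getD []).headD ("", none)),
   (((pyINTERVALS.get? 7).getD []).headD ("", none)),
   (((pyINTERVALS.get? 10).getD []).headD ("", none)),
   (((pyINTERVALS.get? 11).getD []).headD ("", none))]

-- NOTES[s.lower()]; the .getD 0 default is unreachable inside Pre_ (KeyError excluded)
def pyNoteVal (s : String) : Int := (pyNOTES.get? (PySem.Str.lower s)).getD 0

def py_get_interval (note1 note2 : String) : Int :=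
  let interval := pyNoteVal note2 - pyNoteVal note1
  if interval < 0 then interval + 12 else interval

-- 'for note in notes[1:]: intervals.append(get_interval(notes[0], note))'
-- (notes[0] via pyGetD; the default is unreachable inside Pre_, where notes ≠ [])
def py_get_intervals (notes : List String) : List Int :=
  (PySem.List.slice notes (some 1) none).foldl
    (fun acc note => acc ++ [py_get_interval (PySem.List.pyGetD notes 0 "") note]) []

-- 'intervals_verbal.append(INTERVALS[interval][0])' (KeyError impossible: intervals are 0..11;
-- the .getD []/pyGetD defaults are unreachable inside Pre_)
def py_get_base_intervals_verbal (notes : List String) : List (String × Option String) :=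
  (py_get_intervals notes).foldl
    (fun acc interval => acc ++ [PySem.List.pyGetD ((pyINTERVALS.get? interval).getD []) 0 ("", none)]) []

-- the generator get_inversions, fully consumed: yields, then rotates (pop(0)+append = drop 1 ++ take 1,
-- exact for nonempty lists — inside Pre_ every inversion is nonempty); fuel = min(3, len(notes)-1)
def py_inversions_aux (inversion : List String) : Nat → List (List String)
  | 0 => [inversion]
  | n + 1 => inversion :: py_inversions_aux (inversion.drop 1 ++ inversion.take 1) n

def py_get_inversions (notes : List String) : List (List String) :=
  py_inversions_aux notes (min 3 (notes.length - 1))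

-- score loop with its 'found' set of bases
def py_get_inversion_score (intervals : List (String × Option String)) : Int :=
  (intervals.foldl
    (fun (st : Int × PySem.Set String) interval =>
      if interval ∈ pyIMPORTANT ∧ interval.1 ∉ st.2
      then (st.1 + 1, st.2.add interval.1) else st)
    (0, PySem.Set.empty)).1

def get_winner_inversion (notes : List String) : List String :=
  let invs := py_get_inversions notes
  -- 'inversions.append((score, idx, inversion))' over enumerate(get_inversions(notes))
  let pairs := (PySem.List.enumerate invs).foldl
    (fun (acc : List (Int × Int × List String)) p =>
      acc ++ [(py_get_inversion_score (py_get_base_intervals_verbal p.2), p.1, p.2)]) []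
  -- 'sorted(inversions, key=lambda x: -x[0]*10+idx)': idx is the LEAKED loop variable,
  -- a constant equal to the last enumerate index = len(invs)-1
  let sortedPairs := PySem.List.sorted pairs (fun x => -x.1 * 10 + ((invs.length : Int) - 1)) false
  -- 'return inversions[0][2]' (sortedPairs is never empty; the default is unreachable)
  (PySem.List.pyGetD sortedPairs 0 (0, 0, [])).2.2

-- ===== PORT B =====
def get_winner_inversion_alt (notes : List String) : List String :=
  let pitches := notes.map (fun n => (pyNOTES.get? (PySem.Str.lower n)).getD 0)
  let stops : Nat := min 3 (notes.length - 1) + 1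
  let best := (List.range stops).foldl
    (fun (st : Int × Nat) (r : Nat) =>
      let root := PySem.List.pyGetD pitches (r : Int) 0
      let ivs := (pitches.drop (r + 1) ++ pitches.take r).map (fun p => PySem.Int.mod (p - root) 12)
      let score := ([(3, 4), (6, 7), (10, 11)] : List (Int × Int)).foldl
        (fun acc g => if g.1 ∈ ivs ∨ g.2 ∈ ivs then acc + 1 else acc) (0 : Int)
      if score > st.1 then (score, r) else st)
    (-1, 0)
  notes.drop best.2 ++ notes.take best.2

-- ===== PRECONDITION & SPEC =====
-- Pre_ excludes the empty list (A raises IndexError) and lists containing a note whose lowercase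
-- form is not a NOTES key: on those A raises KeyError whenever len(notes) >= 2, but on a
-- single-element bad-note list A returns the input unchanged (it never performs a
-- lookup) while B's own algorithm raises KeyError there, so those inputs are excluded too.
def Pre_get_winner_inversion (notes : List String) : Prop :=
  notes ≠ [] ∧ ∀ n ∈ notes, (pyNOTES.get? (PySem.Str.lower n)).isSome
instance (notes : List String) : Decidable (Pre_get_winner_inversion notes) := by
  unfold Pre_get_winner_inversion; infer_instance

def pvWitness_get_winner_inversion : List String := ["c", "e", "g"]

def Spec_get_winner_inversion (notes : List String) (out : List String) : Prop :=
  out = get_winner_inversion_alt notes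
instance (notes : List String) (out : List String) : Decidable (Spec_get_winner_inversion notes out) := by
  unfold Spec_get_winner_inversion; infer_instance

-- ===== CLAIM (what is proved, stated in full; the proofs are below) =====
def Claim_equal_get_winner_inversion : Prop :=
  ∀ (notes : List String), Dom_get_winner_inversion notes → Pre_get_winner_inversion notes →
    Spec_get_winner_inversion notes (get_winner_inversion notes)

-- ===== LEMMAS AND PROOFS =====

-- the k-th rotation of notes
def pvRot (notes : List String) (k : Nat) : List String := notes.drop k ++ notes.take k

-- A's interval list for the k-th rotation
def pvDs (notes : List String) (r : Nat) : List Int := py_get_intervals (pvRot notes r)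

-- the common closed-form score of the r-th rotation
def pvSc (notes : List String) (r : Nat) : Int :=
  (if 3 ∈ pvDs notes r ∨ 4 ∈ pvDs notes r then 1 else 0)
  + (if 6 ∈ pvDs notes r ∨ 7 ∈ pvDs notes r then 1 else 0)
  + (if 10 ∈ pvDs notes r ∨ 11 ∈ pvDs notes r then 1 else 0)

def pvTrip (notes : List String) (r : Nat) : Int × Int × List String :=
  (pvSc notes r, (r : Int), pvRot notes r)

def pvBstep (sc : Nat → Int) (st : Int × Nat) (r : Nat) : Int × Nat :=
  if sc r > st.1 then (sc r, r) else st

def pvVerbal0 (d : Int) : String × Option String :=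
  PySem.List.pyGetD ((pyINTERVALS.get? d).getD []) 0 ("", none)

theorem pvGetBound (t : String) : ∀ (items : List (String × Int)),
    (∀ p ∈ items, 0 ≤ p.2 ∧ p.2 ≤ 11) →
    0 ≤ ((PySem.Dict.mk items).get? t).getD 0 ∧ ((PySem.Dict.mk items).get? t).getD 0 ≤ 11
  | [], _ => by simp [PySem.Dict.get?]
  | (k, v) :: rest, h => by
      rw [PySem.Dict.get?_mk_cons]
      split_ifs with hk
      · simpa using h (k, v) (List.mem_cons_self ..)
      · exact pvGetBound t rest (fun p hp => h p (List.mem_cons_of_mem _ hp))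

theorem pvNoteVal_bounds (s : String) : 0 ≤ pyNoteVal s ∧ pyNoteVal s ≤ 11 := by
  unfold pyNoteVal
  have h : pyNOTES = PySem.Dict.mk
      [("c",0),("b#",0),("c#",1),("db",1),("d",2),("d#",3),
       ("eb",3),("e",4),("fb",4),("e#",5),("f",5),
       ("f#",6),("gb",6),("g",7),("g#",8),("ab",8),
       ("a",9),("a#",10),("bb",10),("b",11),("cb",11)] := by rfl
  rw [h]
  exact pvGetBound _ _ (by decide)

theorem pvInterval_bounds (a b : String) : 0 ≤ py_get_interval a b ∧ py_get_interval a b < 12 := by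
  have ha := pvNoteVal_bounds a
  have hb := pvNoteVal_bounds b
  simp only [py_get_interval]
  split_ifs <;> omega

theorem pvDs_bounds (l : List String) : ∀ d ∈ py_get_intervals l, 0 ≤ d ∧ d < 12 := by
  unfold py_get_intervals
  rw [PySem.List.foldl_append_singleton_eq_map]
  simp only [List.nil_append, List.mem_map]
  rintro d ⟨x, -, rfl⟩
  exact pvInterval_bounds _ _

theorem pvVerbal_eq (l : List String) :
    py_get_base_intervals_verbal l = (py_get_intervals l).map pvVerbal0 := by
  unfold py_get_base_intervals_verbal pvVerbal0
  rw [PySem.List.foldl_append_singleton_eq_map]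
  simp

def pvStep (st : Int × PySem.Set String) (interval : String × Option String) :
    Int × PySem.Set String :=
  if interval ∈ pyIMPORTANT ∧ interval.1 ∉ st.2 then (st.1 + 1, st.2.add interval.1) else st

theorem pvStep_not_imp (st : Int × PySem.Set String) (iv : String × Option String)
    (h : iv ∉ pyIMPORTANT) : pvStep st iv = st := if_neg (fun hc => h hc.1)

theorem pvStep_imp_mem (st : Int × PySem.Set String) (iv : String × Option String)
    (h : iv.1 ∈ st.2) : pvStep st iv = st := if_neg (fun hc => hc.2 h)

theorem pvStep_imp_new (st : Int × PySem.Set String) (iv : String × Option String)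
    (h1 : iv ∈ pyIMPORTANT) (h2 : iv.1 ∉ st.2) : pvStep st iv = (st.1 + 1, st.2.add iv.1) :=
  if_pos ⟨h1, h2⟩

set_option maxHeartbeats 1000000 in
theorem pvScore_inv (ds : List Int) : ∀ (F : PySem.Set String) (s : Int),
    (∀ d ∈ ds, 0 ≤ d ∧ d < 12) →
    ((ds.map pvVerbal0).foldl pvStep (s, F)).1 =
      s + (if (3 ∈ ds ∨ 4 ∈ ds) ∧ "third" ∉ F then 1 else 0)
        + (if (6 ∈ ds ∨ 7 ∈ ds) ∧ "fifth" ∉ F then 1 else 0)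
        + (if (10 ∈ ds ∨ 11 ∈ ds) ∧ "seventh" ∉ F then 1 else 0) := by
  induction ds with
  | nil => intro F s hb; simp
  | cons d rest ih =>
    intro F s hb
    obtain ⟨h1, h2⟩ := hb d (List.mem_cons_self ..)
    have hb' : ∀ x ∈ rest, 0 ≤ x ∧ x < 12 := fun x hx => hb x (List.mem_cons_of_mem _ hx)
    rw [List.map_cons, List.foldl_cons]
    interval_cases d <;>
      [rw [show pvVerbal0 0 = ("octave", none) from by decide];
       rw [show pvVerbal0 1 = ("ninth", some "flat") from by decide];
       rw [show pvVerbal0 2 = ("ninth", none) from by decide];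
       rw [show pvVerbal0 3 = ("third", some "minor") from by decide];
       rw [show pvVerbal0 4 = ("third", some "major") from by decide];
       rw [show pvVerbal0 5 = ("eleventh", none) from by decide];
       rw [show pvVerbal0 6 = ("fifth", some "diminished") from by decide];
       rw [show pvVerbal0 7 = ("fifth", none) from by decide];
       rw [show pvVerbal0 8 = ("fifth", some "augmented") from by decide];
       rw [show pvVerbal0 9 = ("thirteenth", none) from by decide];
       rw [show pvVerbal0 10 = ("seventh", some "minor") from by decide];
       rw [show pvVerbal0 11 = ("seventh", some "major") from by decide]]
    · rw [pvStep_not_imp _ _ (by decide), ih _ _ hb']; simp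
    · rw [pvStep_not_imp _ _ (by decide), ih _ _ hb']; simp
    · rw [pvStep_not_imp _ _ (by decide), ih _ _ hb']; simp
    · by_cases hf : "third" ∈ F
      · rw [pvStep_imp_mem _ _ (by exact hf), ih _ _ hb']
        simp [hf]
      · rw [pvStep_imp_new _ _ (by decide) (by exact hf), ih _ _ hb']
        simp only [PySem.Set.mem_add, List.mem_cons]
        simp [hf]
    · by_cases hf : "third" ∈ F
      · rw [pvStep_imp_mem _ _ (by exact hf), ih _ _ hb']
        simp [hf]
      · rw [pvStep_imp_new _ _ (by decide) (by exact hf), ih _ _ hb']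
        simp only [PySem.Set.mem_add, List.mem_cons]
        simp [hf]
    · rw [pvStep_not_imp _ _ (by decide), ih _ _ hb']; simp
    · by_cases hf : "fifth" ∈ F
      · rw [pvStep_imp_mem _ _ (by exact hf), ih _ _ hb']
        simp [hf]
      · rw [pvStep_imp_new _ _ (by decide) (by exact hf), ih _ _ hb']
        simp only [PySem.Set.mem_add, List.mem_cons]
        simp [hf]
        all_goals split_ifs <;> omega
    · by_cases hf : "fifth" ∈ F
      · rw [pvStep_imp_mem _ _ (by exact hf), ih _ _ hb']
        simp [hf]
      · rw [pvStep_imp_new _ _ (by decide) (by exact hf), ih _ _ hb']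
        simp only [PySem.Set.mem_add, List.mem_cons]
        simp [hf]
        all_goals split_ifs <;> omega
    · rw [pvStep_not_imp _ _ (by decide), ih _ _ hb']; simp
    · rw [pvStep_not_imp _ _ (by decide), ih _ _ hb']; simp
    · by_cases hf : "seventh" ∈ F
      · rw [pvStep_imp_mem _ _ (by exact hf), ih _ _ hb']
        simp [hf]
      · rw [pvStep_imp_new _ _ (by decide) (by exact hf), ih _ _ hb']
        simp only [PySem.Set.mem_add, List.mem_cons]
        simp [hf]
        all_goals split_ifs <;> omega
    · by_cases hf : "seventh" ∈ F
      · rw [pvStep_imp_mem _ _ (by exact hf), ih _ _ hb']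
        simp [hf]
      · rw [pvStep_imp_new _ _ (by decide) (by exact hf), ih _ _ hb']
        simp only [PySem.Set.mem_add, List.mem_cons]
        simp [hf]
        all_goals split_ifs <;> omega

theorem pvScoreA_eq (notes : List String) (r : Nat) :
    py_get_inversion_score (py_get_base_intervals_verbal (pvRot notes r)) = pvSc notes r := by
  unfold py_get_inversion_score
  rw [pvVerbal_eq]
  have hstep : (fun (st : Int × PySem.Set String) interval =>
      if interval ∈ pyIMPORTANT ∧ interval.1 ∉ st.2
      then (st.1 + 1, st.2.add interval.1) else st) = pvStep := rfl
  rw [hstep, pvScore_inv _ _ _ (pvDs_bounds _)]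
  simp only [pvSc, pvDs, PySem.Set.empty, List.not_mem_nil, not_false_eq_true, and_true, zero_add]
  split_ifs <;> simp

theorem pvSc_nonneg (notes : List String) (r : Nat) : 0 ≤ pvSc notes r := by
  unfold pvSc; split_ifs <;> omega

theorem pvRot_zero (notes : List String) : pvRot notes 0 = notes := by
  simp [pvRot]

theorem pvRot_drop_one (notes : List String) (r : Nat) (h : r < notes.length) :
    (pvRot notes r).drop 1 = notes.drop (r + 1) ++ notes.take r := by
  unfold pvRot
  rw [List.drop_eq_getElem_cons h]
  rfl

theorem pvRot_next (notes : List String) (r : Nat) (h : r < notes.length) :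
    (pvRot notes r).drop 1 ++ (pvRot notes r).take 1 = pvRot notes (r + 1) := by
  unfold pvRot
  rw [List.drop_eq_getElem_cons h]
  simp only [List.cons_append, List.drop_succ_cons, List.drop_zero, List.take_succ_cons,
    List.take_zero]
  rw [List.take_add_one, List.getElem?_eq_getElem h]
  simp [List.append_assoc]

theorem pvInversions_eq (l : List String) : ∀ (n r : Nat), r + n < l.length →
    py_inversions_aux (pvRot l r) n = (List.range (n + 1)).map (fun k => pvRot l (r + k)) := by
  intro n
  induction n with
  | zero => intro r h; simp [py_inversions_aux]
  | succ n ih =>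
    intro r h
    have hr : r < l.length := by omega
    show pvRot l r :: py_inversions_aux ((pvRot l r).drop 1 ++ (pvRot l r).take 1) n = _
    rw [pvRot_next l r hr, ih (r + 1) (by omega)]
    conv_rhs => rw [List.range_succ_eq_map]
    simp only [List.map_cons, List.map_map]
    congr 1
    apply List.map_congr_left
    intro k _
    simp only [Function.comp_apply]
    congr 1
    omega

theorem pvEnum_map {α β : Type} (f : α → β) (l : List α) : ∀ (s : Int),
    PySem.List.enumerate (l.map f) s = (PySem.List.enumerate l s).map (fun p => (p.1, f p.2)) := by
  induction l with
  | nil => intro s; simp [PySem.List.enumerate_nil]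
  | cons x xs ih =>
    intro s
    rw [List.map_cons, PySem.List.enumerate_cons, PySem.List.enumerate_cons, List.map_cons, ih]

theorem pvEnum_range' (m : Nat) :
    PySem.List.enumerate (List.range m) 0 = (List.range m).map (fun (r : Nat) => ((r : Int), r)) := by
  induction m with
  | zero => simp [PySem.List.enumerate_nil]
  | succ n ih =>
    rw [List.range_succ, PySem.List.enumerate_append, ih]
    simp [PySem.List.enumerate_cons, PySem.List.enumerate_nil]

theorem pvGetD_zero_headD {α : Type} (l : List α) (d : α) :
    PySem.List.pyGetD l 0 d = l.headD d := by
  cases l <;> simp [PySem.List.pyGetD, PySem.List.pyGet?, PySem.List.pyIdx?]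

theorem pvHeadD_sorted {α : Type} (key : α → Int) (d : α) (x0 : α) (xs : List α) :
    (PySem.List.sorted (x0 :: xs) key false).headD d
      = xs.foldl (fun b x => if key x < key b then x else b) x0 := by
  induction xs using List.reverseRecOn with
  | nil => simp [PySem.List.sorted_eq_foldl_insertBy, PySem.List.insertBy]
  | append_singleton xs y ih =>
    have hcons : x0 :: (xs ++ [y]) = (x0 :: xs) ++ [y] := rfl
    rw [hcons, PySem.List.sorted_eq_foldl_insertBy, List.foldl_append,
        ← PySem.List.sorted_eq_foldl_insertBy, List.foldl_append]
    obtain ⟨hh, tt, hS⟩ : ∃ hh tt, PySem.List.sorted (x0 :: xs) key false = hh :: tt := by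
      cases hS : PySem.List.sorted (x0 :: xs) key false with
      | nil => exact absurd ((PySem.List.sorted_eq_nil_iff _ _ _).1 hS) (by simp)
      | cons a b => exact ⟨a, b, rfl⟩
    have hfold : xs.foldl (fun b x => if key x < key b then x else b) x0 = hh := by
      rw [← ih, hS]; rfl
    rw [hS, hfold]
    by_cases hk : key y < key hh <;> simp [PySem.List.insertBy, hk]

theorem pvFold_link (sc : Nat → Int) (rot : Nat → List String) (C : Int) (L : List Nat) :
    ∀ (i : Nat),
    (L.map (fun r => (sc r, (r : Int), rot r))).foldl
        (fun b x => if (-x.1 * 10 + C) < (-b.1 * 10 + C) then x else b) (sc i, (i : Int), rot i)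
      = (sc (L.foldl (pvBstep sc) (sc i, i)).2, ((L.foldl (pvBstep sc) (sc i, i)).2 : Int),
         rot (L.foldl (pvBstep sc) (sc i, i)).2) := by
  induction L with
  | nil => intro i; simp
  | cons r L ih =>
    intro i
    simp only [List.map_cons, List.foldl_cons]
    by_cases hc : sc r > sc i
    · rw [show pvBstep sc (sc i, i) r = (sc r, r) from by simp [pvBstep, hc],
          if_pos (by omega : -sc r * 10 + C < -sc i * 10 + C)]
      exact ih r
    · rw [show pvBstep sc (sc i, i) r = (sc i, i) from by simp [pvBstep, hc],
          if_neg (by omega : ¬ (-sc r * 10 + C < -sc i * 10 + C))]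
      exact ih i


theorem pvMod_eq (a b : String) :
    PySem.Int.mod (pyNoteVal b - pyNoteVal a) 12 = py_get_interval a b := by
  have ha := pvNoteVal_bounds a
  have hb := pvNoteVal_bounds b
  rw [PySem.Int.mod_eq_emod_of_pos (by norm_num)]
  simp only [py_get_interval]
  split_ifs <;> omega

theorem pvIvs_eq (notes : List String) (r : Nat) (h : r < notes.length) :
    ((notes.map pyNoteVal).drop (r + 1) ++ (notes.map pyNoteVal).take r).map
      (fun p => PySem.Int.mod (p - PySem.List.pyGetD (notes.map pyNoteVal) (r : Int) 0) 12)
    = pvDs notes r := by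
  have hr' : r < (notes.map pyNoteVal).length := by simpa using h
  have hroot : PySem.List.pyGetD (notes.map pyNoteVal) (r : Int) 0 = pyNoteVal notes[r] := by
    rw [PySem.List.pyGetD_natCast, List.getD_eq_getElem _ _ hr']
    simp
  have hhead : PySem.List.pyGetD (pvRot notes r) 0 "" = notes[r] := by
    rw [pvGetD_zero_headD]
    unfold pvRot
    rw [List.drop_eq_getElem_cons h]
    rfl
  unfold pvDs py_get_intervals
  rw [PySem.List.foldl_append_singleton_eq_map
      (f := fun note => py_get_interval (PySem.List.pyGetD (pvRot notes r) 0 "") note)]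
  rw [List.nil_append, hhead, hroot,
      PySem.List.slice_from _ (by norm_num : (0 : Int) ≤ 1)]
  simp only [Int.toNat_one]
  rw [← List.map_drop, ← List.map_take, ← List.map_append, ← pvRot_drop_one notes r h,
      List.map_map]
  apply List.map_congr_left
  intro m _
  simp only [Function.comp_apply]
  exact pvMod_eq notes[r] m

theorem pvGrp_eq (notes : List String) (r : Nat) :
    (([(3, 4), (6, 7), (10, 11)] : List (Int × Int)).foldl
      (fun acc g => if g.1 ∈ pvDs notes r ∨ g.2 ∈ pvDs notes r then acc + 1 else acc) (0 : Int))
    = pvSc notes r := by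
  simp only [List.foldl_cons, List.foldl_nil, pvSc]
  split_ifs <;> omega

theorem pvBfold_eq (f g : Nat → Int) (L : List Nat) (hfg : ∀ r ∈ L, f r = g r) (st : Int × Nat) :
    L.foldl (fun (st : Int × Nat) r => if f r > st.1 then (f r, r) else st) st
      = L.foldl (pvBstep g) st := by
  apply PySem.List.foldl_congr_mem
  intro acc x hx
  rw [hfg x hx]
  rfl

theorem pvPairs_eq (notes : List String) (m : Nat) :
    (List.range m).map (((fun (p : Int × List String) =>
        (py_get_inversion_score (py_get_base_intervals_verbal p.2), p.1, p.2)) ∘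
      (fun (p : Int × Nat) => (p.1, pvRot notes p.2))) ∘ (fun (r : Nat) => ((r : Int), r)))
    = (List.range m).map (fun (r : Nat) => (pvSc notes r, (r : Int), pvRot notes r)) := by
  apply List.map_congr_left
  intro r _
  simp only [Function.comp_apply]
  rw [pvScoreA_eq]

-- ===== VERDICT (by name: the statement is the Claim_ definition above) =====
theorem get_winner_inversion_spec : Claim_equal_get_winner_inversion := by
  intro notes _ hpre
  obtain ⟨hne, _⟩ := hpre
  have hlen : 0 < notes.length := List.length_pos_iff.mpr hne
  unfold Spec_get_winner_inversion
  have hstoplt : min 3 (notes.length - 1) < notes.length := by omega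
  set stop := min 3 (notes.length - 1) with hstopdef
  have hinv : py_get_inversions notes = (List.range (stop + 1)).map (fun k => pvRot notes k) := by
    have h0 := pvInversions_eq notes stop 0 (by omega)
    rw [pvRot_zero] at h0
    simp only [Nat.zero_add] at h0
    exact h0
  have hsc0 := pvSc_nonneg notes 0
  -- A side
  have hA : get_winner_inversion notes =
      pvRot notes ((((List.range stop).map Nat.succ).foldl (pvBstep (pvSc notes))
        (pvSc notes 0, 0)).2) := by
    simp only [get_winner_inversion]
    rw [hinv]
    rw [PySem.List.foldl_append_singleton_eq_map
        (f := fun (p : Int × List String) =>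
          (py_get_inversion_score (py_get_base_intervals_verbal p.2), p.1, p.2))]
    rw [List.nil_append, pvEnum_map, pvEnum_range', List.map_map, List.map_map]
    rw [pvPairs_eq]
    rw [show ((List.range (stop + 1)).map (fun k => pvRot notes k)).length = stop + 1 from by simp]
    rw [List.range_succ_eq_map, List.map_cons]
    rw [pvGetD_zero_headD, pvHeadD_sorted]
    rw [pvFold_link (pvSc notes) (fun k => pvRot notes k) (((stop + 1 : Nat) : Int) - 1)
        ((List.range stop).map Nat.succ)]
  -- B side
  have hB : get_winner_inversion_alt notes =
      pvRot notes ((((List.range stop).map Nat.succ).foldl (pvBstep (pvSc notes))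
        (pvSc notes 0, 0)).2) := by
    simp only [get_winner_inversion_alt]
    rw [show (fun n => (pyNOTES.get? (PySem.Str.lower n)).getD 0) = pyNoteVal from rfl]
    rw [pvBfold_eq _ (pvSc notes) _
        (fun r hr => by
          have hrlt : r < notes.length := by
            have := List.mem_range.mp hr; omega
          rw [pvIvs_eq notes r hrlt]
          exact pvGrp_eq notes r)]
    rw [List.range_succ_eq_map, List.foldl_cons]
    rw [show pvBstep (pvSc notes) (-1, 0) 0 = (pvSc notes 0, 0) from by
      unfold pvBstep; rw [if_pos (by omega)]]
    rfl
  rw [hA, hB]
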